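-- pv_equiv track=rewrite | github.com/mohammedrady44/cs50-intro-programming-python | python_problems/Vanity_plates.py | check_middle
-- ===== SOURCE A (Python) =====
-- def check_string(text):
--     for i in range(0,len(text)):
--         if text[i].lower() < "a" or text[i].lower() > "z":
--             return i
--     return -1
--
-- def check_middle(text):
--     ready = False
--     for letter in text: #check of the numbers at the end,also check the letter if it is number,letter
--         if check_string(letter) != -1 and (letter < "0" or letter > "9"):
--             return False
--
--         if letter >= "0" and letter <= "9":
--             ready = True
--
--         elif ready == True:
--             return False
--     return True
-- ===== SOURCE B (Python) =====
-- def check_middle(text):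
--     i = 0
--     n = len(text)
--     while i < n and 'a' <= text[i].lower() <= 'z':
--         i += 1
--     while i < n and '0' <= text[i] <= '9':
--         i += 1
--     return i == n
-- ===== Notes on version B (the rewrite author's own statement) =====
-- stated objective: faster
-- what changed: Replaced A's flag-carrying state machine (which builds a one-char string and calls an index-scanning helper for every character) by a two-phase index scanner that consumes the leading letters, then the trailing digits, and checks the whole string was consumed.
import Mathlib
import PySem

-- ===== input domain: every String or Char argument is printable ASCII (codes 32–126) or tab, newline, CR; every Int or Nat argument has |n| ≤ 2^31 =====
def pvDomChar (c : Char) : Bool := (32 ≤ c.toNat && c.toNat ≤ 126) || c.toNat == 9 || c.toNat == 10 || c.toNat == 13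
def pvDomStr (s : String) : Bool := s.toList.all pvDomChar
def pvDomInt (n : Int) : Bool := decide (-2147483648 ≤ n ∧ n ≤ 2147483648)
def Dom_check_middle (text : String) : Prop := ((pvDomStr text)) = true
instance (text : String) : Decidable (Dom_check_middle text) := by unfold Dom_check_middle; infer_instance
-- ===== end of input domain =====

-- B replaces A's flag-driven single pass by two sequential phase scans (letters, then digits); same O(n) cost, plainer structure.

-- ===== PORT A =====
-- helper check_string: 'for i in range(0, len(text)): if text[i].lower() < "a" or text[i].lower() > "z": return i; return -1'
def check_string_aux : List Char → Int → Int
  | [], _ => -1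
  | c :: rest, i =>
    if PySem.Chars.lowerChar c < 'a' ∨ 'z' < PySem.Chars.lowerChar c then i
    else check_string_aux rest (i + 1)

def check_string (text : String) : Int := check_string_aux text.toList 0

-- the 'for letter in text' loop carrying the 'ready' flag
def check_middle_loop : List Char → Bool → Bool
  | [], _ => true
  | c :: rest, ready =>
    if check_string (String.ofList [c]) ≠ -1 ∧ (c < '0' ∨ '9' < c) then false
    else if '0' ≤ c ∧ c ≤ '9' then check_middle_loop rest true
    else if ready = true then false
    else check_middle_loop rest ready

def check_middle (text : String) : Bool := check_middle_loop text.toList false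

-- ===== PORT B =====
-- phase 1: 'while i < n and "a" <= text[i].lower() <= "z": i += 1' — returns the unconsumed suffix
def altLetters : List Char → List Char
  | [] => []
  | c :: rest =>
    if 'a' ≤ PySem.Chars.lowerChar c ∧ PySem.Chars.lowerChar c ≤ 'z' then altLetters rest
    else c :: rest

-- phase 2: 'while i < n and "0" <= text[i] <= "9": i += 1'
def altDigits : List Char → List Char
  | [] => []
  | c :: rest =>
    if '0' ≤ c ∧ c ≤ '9' then altDigits rest
    else c :: rest

def check_middle_alt (text : String) : Bool :=
  (altDigits (altLetters text.toList)).isEmpty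

-- ===== PRECONDITION & SPEC =====
def Spec_check_middle (text : String) (out : Bool) : Prop := out = check_middle_alt text
instance (text : String) (out : Bool) : Decidable (Spec_check_middle text out) := by unfold Spec_check_middle; infer_instance

-- ===== CLAIM (what is proved, stated in full; the proofs are below) =====
def Claim_equal_check_middle : Prop := ∀ (text : String), Dom_check_middle text → Spec_check_middle text (check_middle text)

-- ===== LEMMAS AND PROOFS =====

-- a digit is unchanged by lowerChar, hence is not a letter
theorem lowerChar_digit {c : Char} (h1 : '0' ≤ c) (h2 : c ≤ '9') : PySem.Chars.lowerChar c = c := by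
  simp only [PySem.Chars.lowerChar, PySem.Chars.isupper]
  have : ¬('A' ≤ c ∧ c ≤ 'Z') := by
    rintro ⟨ha, hb⟩
    simp [Char.le_def, UInt32.le_iff_toNat_le] at *
    omega
  simp only [Bool.and_eq_true, decide_eq_true_eq]
  rw [if_neg this]

theorem loop_ready_true (cs : List Char) :
    check_middle_loop cs true = (altDigits cs).isEmpty := by
  induction cs with
  | nil => simp [check_middle_loop, altDigits]
  | cons c rest ih =>
    by_cases hD : '0' ≤ c ∧ c ≤ '9'
    · have hne : ¬(c < '0' ∨ '9' < c) := by
        rintro (h | h) <;> simp [Char.lt_def, Char.le_def, UInt32.le_iff_toNat_le, UInt32.lt_iff_toNat_lt] at * <;> omega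
      simp [check_middle_loop, altDigits, hD, hne, ih]
    · have h' : c < '0' ∨ '9' < c := by
        by_contra h
        push Not at h
        exact hD h
      by_cases hL : PySem.Chars.lowerChar c < 'a' ∨ 'z' < PySem.Chars.lowerChar c
      · -- non-letter non-digit: A's first branch fires
        simp [check_middle_loop, check_string, String.toList_ofList, check_string_aux, altDigits, hD, hL, h']
      · -- letter after a digit: ready flag kills it
        simp [check_middle_loop, check_string, String.toList_ofList, check_string_aux, altDigits, hD, hL]

theorem loop_ready_false (cs : List Char) :
    check_middle_loop cs false = (altDigits (altLetters cs)).isEmpty := by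
  induction cs with
  | nil => simp [check_middle_loop, altLetters, altDigits]
  | cons c rest ih =>
    by_cases hD : '0' ≤ c ∧ c ≤ '9'
    · -- digit: ready becomes true; B leaves the letter phase
      have hne : ¬(c < '0' ∨ '9' < c) := by
        rintro (h | h) <;> simp [Char.lt_def, Char.le_def, UInt32.le_iff_toNat_le, UInt32.lt_iff_toNat_lt] at * <;> omega
      have hlow := lowerChar_digit hD.1 hD.2
      have hnotL : ¬('a' ≤ PySem.Chars.lowerChar c ∧ PySem.Chars.lowerChar c ≤ 'z') := by
        rw [hlow]
        rintro ⟨ha, _⟩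
        have := hD.2
        simp [Char.le_def, UInt32.le_iff_toNat_le] at *
        omega
      simp [check_middle_loop, altLetters, altDigits, hD, hne, hnotL, loop_ready_true]
    · have h' : c < '0' ∨ '9' < c := by
        by_contra h
        push Not at h
        exact hD h
      by_cases hL : PySem.Chars.lowerChar c < 'a' ∨ 'z' < PySem.Chars.lowerChar c
      · -- non-letter non-digit: both reject
        have hnotL : ¬('a' ≤ PySem.Chars.lowerChar c ∧ PySem.Chars.lowerChar c ≤ 'z') := by
          rintro ⟨ha, hb⟩
          rcases hL with h | h
          · exact absurd ha (not_le.mpr h)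
          · exact absurd hb (not_le.mpr h)
        simp [check_middle_loop, check_string, String.toList_ofList, check_string_aux, altLetters, altDigits, hD, hL, h', hnotL]
      · -- letter: both consume it
        have hIsL : 'a' ≤ PySem.Chars.lowerChar c ∧ PySem.Chars.lowerChar c ≤ 'z' := by
          push Not at hL
          exact ⟨le_of_not_gt (fun h => absurd hL.1 (not_le.mpr h)), hL.2⟩
        simp [check_middle_loop, check_string, String.toList_ofList, check_string_aux, altLetters, hD, hL, hIsL, ih]

-- ===== VERDICT (by name: the statement is the Claim_ definition above) =====
theorem check_middle_spec : Claim_equal_check_middle := by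
  intro text _
  unfold Spec_check_middle check_middle check_middle_alt
  exact loop_ready_false text.toList
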